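-- pv_equiv track=rewrite | github.com/jniemeyer46/Evolutionary_1B | rotate.py | rotate_shape
-- ===== SOURCE A (Python) =====
-- def rotate_shape(num, string):
-- 	if num == 1:
-- 		# list of rotated elements
-- 		word = []
-- 		moves = string.split(" ")
-- 		for element in moves:
-- 			if element[0] == 'U':
-- 				element = 'R' + element[1]
-- 				word.append(element)
-- 			elif element[0] == 'D':
-- 				element = 'L' + element[1]
-- 				word.append(element)
-- 			elif element[0] == 'R':
-- 				element = 'D' + element[1]
-- 				word.append(element)
-- 			elif element[0] == 'L':
-- 				element = 'U' + element[1]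
-- 				word.append(element)
-- 	elif num == 2:
-- 		word = []
-- 		moves = string.split(" ")
-- 		for element in moves:
-- 			if element[0] == 'U':
-- 				element = 'D' + element[1]
-- 				word.append(element)
-- 			elif element[0] == 'D':
-- 				element = 'U' + element[1]
-- 				word.append(element)
-- 			elif element[0] == 'R':
-- 				element = 'L' + element[1]
-- 				word.append(element)
-- 			elif element[0] == 'L':
-- 				element = 'R' + element[1]
-- 				word.append(element)
-- 	elif num == 3:
-- 		word = []
-- 		moves = string.split(" ")
-- 		for element in moves:
-- 			if element[0] == 'U':
-- 				element = 'L' + element[1]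
-- 				word.append(element)
-- 			elif element[0] == 'D':
-- 				element = 'R' + element[1]
-- 				word.append(element)
-- 			elif element[0] == 'R':
-- 				element = 'U' + element[1]
-- 				word.append(element)
-- 			elif element[0] == 'L':
-- 				element = 'D' + element[1]
-- 				word.append(element)
--
-- 	# combines the list of elements back into a string
-- 	shape = ' '.join(word)
--
-- 	return shape
-- ===== SOURCE B (Python) =====
-- _QUARTER = {'U': 'R', 'R': 'D', 'D': 'L', 'L': 'U'}
--
-- def rotate_shape(num, string):
--     if num not in (1, 2, 3):
--         raise ValueError("num must be 1, 2 or 3")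
--     # stage 1: keep only the tokens whose first char is a direction
--     tokens = [t for t in string.split(" ") if t[0] in _QUARTER]
--     # stage 2: compose a single quarter turn num times
--     for _ in range(num):
--         tokens = [_QUARTER[t[0]] + t[1] for t in tokens]
--     return ' '.join(tokens)
-- ===== Notes on version B (the rewrite author's own statement) =====
-- stated objective: alternative
-- what changed: B decomposes the rotation into staged passes instead of A's single pass through one of three hardcoded four-way branch tables: it first filters the split tokens down to direction tokens, then applies ONE quarter-turn map (a 4-entry dict) num times in sequence; correctness rests on a quarter turn composed k times being the k-quarter rotation.
import Mathlib
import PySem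

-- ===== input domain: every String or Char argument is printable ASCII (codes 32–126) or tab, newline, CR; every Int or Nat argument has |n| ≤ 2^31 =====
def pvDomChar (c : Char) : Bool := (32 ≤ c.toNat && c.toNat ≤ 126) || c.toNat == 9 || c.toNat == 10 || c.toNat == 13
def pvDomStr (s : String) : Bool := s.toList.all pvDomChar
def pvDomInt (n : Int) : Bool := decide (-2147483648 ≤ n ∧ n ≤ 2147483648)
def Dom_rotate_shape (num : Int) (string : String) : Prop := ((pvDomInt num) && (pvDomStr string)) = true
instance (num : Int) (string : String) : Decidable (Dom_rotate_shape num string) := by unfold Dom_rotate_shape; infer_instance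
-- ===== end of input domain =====

-- B replaces A's single pass through three hardcoded four-way branch tables by staged
-- passes: filter to direction tokens once, then apply one quarter-turn map num times.

-- ===== PORT A =====
-- one step of A's num == 1 loop body (the four-way elif chain)
def pvA1 (w : List (List Char)) (e : List Char) : List (List Char) :=
  if PySem.List.pyGetD e 0 ' ' = 'U' then w ++ [['R', PySem.List.pyGetD e 1 ' ']]
  else if PySem.List.pyGetD e 0 ' ' = 'D' then w ++ [['L', PySem.List.pyGetD e 1 ' ']]
  else if PySem.List.pyGetD e 0 ' ' = 'R' then w ++ [['D', PySem.List.pyGetD e 1 ' ']]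
  else if PySem.List.pyGetD e 0 ' ' = 'L' then w ++ [['U', PySem.List.pyGetD e 1 ' ']]
  else w

-- one step of A's num == 2 loop body
def pvA2 (w : List (List Char)) (e : List Char) : List (List Char) :=
  if PySem.List.pyGetD e 0 ' ' = 'U' then w ++ [['D', PySem.List.pyGetD e 1 ' ']]
  else if PySem.List.pyGetD e 0 ' ' = 'D' then w ++ [['U', PySem.List.pyGetD e 1 ' ']]
  else if PySem.List.pyGetD e 0 ' ' = 'R' then w ++ [['L', PySem.List.pyGetD e 1 ' ']]
  else if PySem.List.pyGetD e 0 ' ' = 'L' then w ++ [['R', PySem.List.pyGetD e 1 ' ']]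
  else w

-- one step of A's num == 3 loop body
def pvA3 (w : List (List Char)) (e : List Char) : List (List Char) :=
  if PySem.List.pyGetD e 0 ' ' = 'U' then w ++ [['L', PySem.List.pyGetD e 1 ' ']]
  else if PySem.List.pyGetD e 0 ' ' = 'D' then w ++ [['R', PySem.List.pyGetD e 1 ' ']]
  else if PySem.List.pyGetD e 0 ' ' = 'R' then w ++ [['U', PySem.List.pyGetD e 1 ' ']]
  else if PySem.List.pyGetD e 0 ' ' = 'L' then w ++ [['D', PySem.List.pyGetD e 1 ' ']]
  else w

def rotate_shape (num : Int) (string : String) : String :=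
  let word : List (List Char) :=
    if num = 1 then (PySem.Chars.splitOn string.toList [' ']).foldl pvA1 []
    else if num = 2 then (PySem.Chars.splitOn string.toList [' ']).foldl pvA2 []
    else if num = 3 then (PySem.Chars.splitOn string.toList [' ']).foldl pvA3 []
    else []  -- Python raises NameError here ('word' undefined); excluded by Pre_
  String.ofList (PySem.Chars.join [' '] word)

-- ===== PORT B =====
-- _QUARTER
def pvQDict : PySem.Dict Char Char :=
  PySem.Dict.ofList [('U', 'R'), ('R', 'D'), ('D', 'L'), ('L', 'U')]

-- B's filter predicate: t[0] in _QUARTER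
def pvKeep (t : List Char) : Bool := pvQDict.contains (PySem.List.pyGetD t 0 ' ')

-- one quarter-turn pass: [_QUARTER[t[0]] + t[1] for t in tokens]
-- (the getD ' ' default is unreachable: every kept token's head is a dict key, so
--  the Python lookup never raises KeyError on these tokens)
def pvQmap (tokens : List (List Char)) : List (List Char) :=
  tokens.map (fun t =>
    [(pvQDict.get? (PySem.List.pyGetD t 0 ' ')).getD ' ', PySem.List.pyGetD t 1 ' '])

def rotate_shape_alt (num : Int) (string : String) : String :=
  if num = 1 ∨ num = 2 ∨ num = 3 then
    let tokens := (PySem.Chars.splitOn string.toList [' ']).filter pvKeep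
    let tokens := (PySem.List.pyRange 0 num 1).foldl (fun acc _ => pvQmap acc) tokens
    String.ofList (PySem.Chars.join [' '] tokens)
  else ""  -- Python raises ValueError here; excluded by Pre_

-- ===== PRECONDITION & SPEC =====
-- Pre_ excludes num outside {1,2,3} (A raises NameError: 'word' is never defined, B raises
-- ValueError) and strings with an empty token or a 1-char direction token (A raises
-- IndexError on element[0] resp. element[1], B on t[0] resp. t[1]).
def Pre_rotate_shape (num : Int) (string : String) : Prop :=
  (num = 1 ∨ num = 2 ∨ num = 3) ∧
  ∀ t ∈ PySem.Chars.splitOn string.toList [' '],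
    t ≠ [] ∧ (t.headD ' ' ∈ (['U', 'R', 'D', 'L'] : List Char) → 2 ≤ t.length)
instance (num : Int) (string : String) : Decidable (Pre_rotate_shape num string) := by
  unfold Pre_rotate_shape; infer_instance

def pvWitness_rotate_shape : Int × String := (1, "U2 D1 x9")

def Spec_rotate_shape (num : Int) (string : String) (out : String) : Prop := out = rotate_shape_alt num string
instance (num : Int) (string : String) (out : String) : Decidable (Spec_rotate_shape num string out) := by unfold Spec_rotate_shape; infer_instance

-- ===== CLAIM (what is proved, stated in full; the proofs are below) =====
def Claim_equal_rotate_shape : Prop := ∀ (num : Int) (string : String), Dom_rotate_shape num string → Pre_rotate_shape num string → Spec_rotate_shape num string (rotate_shape num string)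

-- ===== LEMMAS AND PROOFS =====

-- the k-quarter rotation of a char (proof device, used only for k = 1, 2, 3)
def pvRot (k : Nat) (c : Char) : Char :=
  if c = 'U' then (['U', 'R', 'D', 'L'] : List Char).getD (k % 4) ' '
  else if c = 'R' then (['R', 'D', 'L', 'U'] : List Char).getD (k % 4) ' '
  else if c = 'D' then (['D', 'L', 'U', 'R'] : List Char).getD (k % 4) ' '
  else if c = 'L' then (['L', 'U', 'R', 'D'] : List Char).getD (k % 4) ' '
  else c

-- a token mapped through the k-quarter rotation, second char kept
def pvG (k : Nat) (t : List Char) : List Char :=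
  [pvRot k (PySem.List.pyGetD t 0 ' '), PySem.List.pyGetD t 1 ' ']

lemma qU : (pvQDict.get? 'U').getD ' ' = 'R' := by decide
lemma qR : (pvQDict.get? 'R').getD ' ' = 'D' := by decide
lemma qD : (pvQDict.get? 'D').getD ' ' = 'L' := by decide
lemma qL : (pvQDict.get? 'L').getD ' ' = 'U' := by decide

lemma keep_cases (c : Char) (h : pvQDict.contains c = true) :
    c = 'U' ∨ c = 'R' ∨ c = 'D' ∨ c = 'L' := by
  rw [show pvQDict = PySem.Dict.mk [('U', 'R'), ('R', 'D'), ('D', 'L'), ('L', 'U')] from rfl] at h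
  simp at h
  tauto

lemma notkeep_cases (c : Char) (h : ¬ pvQDict.contains c = true) :
    ¬ c = 'U' ∧ ¬ c = 'R' ∧ ¬ c = 'D' ∧ ¬ c = 'L' := by
  rw [show pvQDict = PySem.Dict.mk [('U', 'R'), ('R', 'D'), ('D', 'L'), ('L', 'U')] from rfl] at h
  simp at h
  tauto

-- A's fold for num == k produces the kept tokens mapped through the k-quarter rotation
lemma foldA1 (ts : List (List Char)) : ∀ w,
    ts.foldl pvA1 w = w ++ (ts.filter pvKeep).map (pvG 1) := by
  induction ts with
  | nil => simp
  | cons t ts ih =>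
    intro w
    simp only [List.foldl_cons, ih]
    by_cases h : pvKeep t = true
    · rcases keep_cases _ h with hc | hc | hc | hc <;>
        simp [pvA1, pvG, pvRot, hc, h]
    · obtain ⟨h1, h2, h3, h4⟩ := notkeep_cases _ h
      simp [pvA1, h1, h2, h3, h4, h]

lemma foldA2 (ts : List (List Char)) : ∀ w,
    ts.foldl pvA2 w = w ++ (ts.filter pvKeep).map (pvG 2) := by
  induction ts with
  | nil => simp
  | cons t ts ih =>
    intro w
    simp only [List.foldl_cons, ih]
    by_cases h : pvKeep t = true
    · rcases keep_cases _ h with hc | hc | hc | hc <;>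
        simp [pvA2, pvG, pvRot, hc, h]
    · obtain ⟨h1, h2, h3, h4⟩ := notkeep_cases _ h
      simp [pvA2, h1, h2, h3, h4, h]

lemma foldA3 (ts : List (List Char)) : ∀ w,
    ts.foldl pvA3 w = w ++ (ts.filter pvKeep).map (pvG 3) := by
  induction ts with
  | nil => simp
  | cons t ts ih =>
    intro w
    simp only [List.foldl_cons, ih]
    by_cases h : pvKeep t = true
    · rcases keep_cases _ h with hc | hc | hc | hc <;>
        simp [pvA3, pvG, pvRot, hc, h]
    · obtain ⟨h1, h2, h3, h4⟩ := notkeep_cases _ h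
      simp [pvA3, h1, h2, h3, h4, h]

-- one quarter-turn pass on a list of kept tokens is the 1-quarter rotation
lemma qmap_base (l : List (List Char)) (h : ∀ t ∈ l, pvKeep t = true) :
    pvQmap l = l.map (pvG 1) := by
  unfold pvQmap
  refine List.map_congr_left (fun t ht => ?_)
  rcases keep_cases _ (h t ht) with hc | hc | hc | hc <;>
    simp [pvG, pvRot, hc, qU, qR, qD, qL]

-- a quarter-turn pass after a k-quarter rotation of kept tokens is the (k+1)-rotation
lemma qmap_step (k : Nat) (l : List (List Char)) (h : ∀ t ∈ l, pvKeep t = true) :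
    pvQmap (l.map (pvG k)) = l.map (pvG (k + 1)) := by
  unfold pvQmap
  rw [List.map_map]
  refine List.map_congr_left (fun t ht => ?_)
  rcases keep_cases _ (h t ht) with hc | hc | hc | hc <;>
  · simp only [Function.comp, pvG, pvRot, hc]
    have hk : k % 4 = 0 ∨ k % 4 = 1 ∨ k % 4 = 2 ∨ k % 4 = 3 := by omega
    have hk1 : (k + 1) % 4 = (k % 4 + 1) % 4 := by omega
    rcases hk with h4 | h4 | h4 | h4 <;>
      simp [h4, hk1, PySem.List.pyGetD, qU, qR, qD, qL]

lemma mem_filter_keep (l : List (List Char)) :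
    ∀ t ∈ l.filter pvKeep, pvKeep t = true := by
  intro t ht; exact (List.mem_filter.mp ht).2

-- ===== VERDICT (by name: the statement is the Claim_ definition above) =====
theorem rotate_shape_spec : Claim_equal_rotate_shape := by
  intro num string _ hpre
  unfold Spec_rotate_shape
  obtain ⟨hnum, _⟩ := hpre
  set ts := PySem.Chars.splitOn string.toList [' '] with hts
  have hf := mem_filter_keep ts
  rcases hnum with h | h | h <;> subst h <;>
    simp only [rotate_shape, rotate_shape_alt, ← hts] <;> norm_num
  · rw [show PySem.List.pyRange 0 1 1 = [0] from by decide]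
    simp only [List.foldl_cons, List.foldl_nil]
    rw [foldA1, qmap_base _ hf]; simp
  · rw [show PySem.List.pyRange 0 2 1 = [0, 1] from by decide]
    simp only [List.foldl_cons, List.foldl_nil]
    rw [foldA2, qmap_base _ hf, qmap_step 1 _ hf]; simp
  · rw [show PySem.List.pyRange 0 3 1 = [0, 1, 2] from by decide]
    simp only [List.foldl_cons, List.foldl_nil]
    rw [foldA3, qmap_base _ hf, qmap_step 1 _ hf, qmap_step 2 _ hf]; simp
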